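-- pv_equiv track=rewrite | github.com/eliottcassidy2000/math | 04-computation/path_homology_tournament_n6n7.py | check_multisquare_free
-- ===== SOURCE A (Python) =====
-- def check_multisquare_free(adj):
--     """Check if digraph is multisquare-free."""
--     n = len(adj)
--     for x in range(n):
--         for y in range(n):
--             if x == y:
--                 continue
--             count = 0
--             for z in range(n):
--                 if z != x and z != y and adj[x][z] and adj[z][y]:
--                     count += 1
--             if count >= 3:
--                 return False, (x, y, count)
--     return True, None
-- ===== SOURCE B (Python) =====
-- def check_multisquare_free(adj):
--     """Check if digraph is multisquare-free."""
--     n = len(adj)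
--     b = [[1 if adj[i][j] else 0 for j in range(n)] for i in range(n)]
--     c = [[sum(bi[k] * b[k][j] for k in range(n)) for j in range(n)] for bi in b]
--     bad = next(((x, y, c[x][y] - b[x][x] * b[x][y] - b[x][y] * b[y][y])
--                 for x in range(n) for y in range(n)
--                 if x != y and c[x][y] - b[x][x] * b[x][y] - b[x][y] * b[y][y] >= 3),
--                None)
--     return bad is None, bad
-- ===== Notes on version B (the rewrite author's own statement) =====
-- stated objective: alternative
-- what changed: Replaces A's fused early-exit triple loop with matrix arithmetic: build a 0/1 matrix, square it to get all length-2 path counts, correct each pair's entry by subtracting the z=x and z=y terms, and pick the first offending pair from a generator.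
-- outside the precondition, e.g. on check_multisquare_free([[]]): A returns (True, None), B raises IndexError; on check_multisquare_free([[], [0]]): A returns (True, None), B raises IndexError
import Mathlib
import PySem

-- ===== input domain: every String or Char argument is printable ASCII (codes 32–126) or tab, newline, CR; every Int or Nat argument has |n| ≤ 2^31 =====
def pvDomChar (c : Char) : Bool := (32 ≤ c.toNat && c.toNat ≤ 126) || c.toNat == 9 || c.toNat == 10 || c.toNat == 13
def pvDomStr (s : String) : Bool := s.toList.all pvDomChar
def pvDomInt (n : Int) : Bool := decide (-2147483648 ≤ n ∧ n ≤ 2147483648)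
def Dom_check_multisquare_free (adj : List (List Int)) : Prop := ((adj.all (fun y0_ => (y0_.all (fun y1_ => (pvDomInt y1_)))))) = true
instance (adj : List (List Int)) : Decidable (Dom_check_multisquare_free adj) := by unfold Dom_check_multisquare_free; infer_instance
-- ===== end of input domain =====

-- B replaces A's fused early-exit triple loop by matrix arithmetic: build the 0/1 adjacency
-- matrix, square it to get all length-2-path counts, correct each pair by the z=x and z=y
-- terms, and take the first offending pair (objective: alternative).

-- ===== PORT A =====
def check_multisquare_free (adj : List (List Int)) : Bool × (Option (Int × Int × Int)) :=
  let n : Int := (adj.length : Int)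
  match (PySem.List.pyRange 0 n 1).findSome? (fun x =>
      (PySem.List.pyRange 0 n 1).findSome? (fun y =>
        if x = y then none
        else
          let count := (PySem.List.pyRange 0 n 1).foldl (fun count z =>
            if z ≠ x ∧ z ≠ y ∧ PySem.List.pyGetD (PySem.List.pyGetD adj x []) z 0 ≠ 0
                ∧ PySem.List.pyGetD (PySem.List.pyGetD adj z []) y 0 ≠ 0
            then count + 1 else count) 0
          if count ≥ 3 then some (x, y, count) else none)) with
  | some t => (false, some t)
  | none => (true, none)

-- ===== PORT B =====
-- b = [[1 if adj[i][j] else 0 for j in range(n)] for i in range(n)]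
def pvMatB (adj : List (List Int)) (n : Int) : List (List Int) :=
  (PySem.List.pyRange 0 n 1).map (fun i =>
    (PySem.List.pyRange 0 n 1).map (fun j =>
      if PySem.List.pyGetD (PySem.List.pyGetD adj i []) j 0 ≠ 0 then 1 else 0))

-- c = [[sum(bi[k] * b[k][j] for k in range(n)) for j in range(n)] for bi in b]
def pvMatC (b : List (List Int)) (n : Int) : List (List Int) :=
  b.map (fun bi =>
    (PySem.List.pyRange 0 n 1).map (fun j =>
      ((PySem.List.pyRange 0 n 1).map (fun k =>
        PySem.List.pyGetD bi k 0 * PySem.List.pyGetD (PySem.List.pyGetD b k []) j 0)).sum))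

-- c[x][y] - b[x][x]*b[x][y] - b[x][y]*b[y][y]
def pvCnt (b c : List (List Int)) (x y : Int) : Int :=
  PySem.List.pyGetD (PySem.List.pyGetD c x []) y 0
    - PySem.List.pyGetD (PySem.List.pyGetD b x []) x 0 * PySem.List.pyGetD (PySem.List.pyGetD b x []) y 0
    - PySem.List.pyGetD (PySem.List.pyGetD b x []) y 0 * PySem.List.pyGetD (PySem.List.pyGetD b y []) y 0

def check_multisquare_free_alt (adj : List (List Int)) : Bool × (Option (Int × Int × Int)) :=
  let n : Int := (adj.length : Int)
  let b := pvMatB adj n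
  let c := pvMatC b n
  let bad := ((PySem.List.pyRange 0 n 1).flatMap (fun x =>
      (PySem.List.pyRange 0 n 1).filterMap (fun y =>
        if x ≠ y ∧ pvCnt b c x y ≥ 3 then some (x, y, pvCnt b c x y) else none))).head?
  (bad.isNone, bad)

-- ===== PRECONDITION & SPEC =====
-- Pre_ excludes ragged/short-rowed inputs (a row shorter than len(adj)): Python B always reads
-- a full n×n block and raises IndexError there, and Python A raises there too unless an earlier
-- pair triggers its early return (that accidental early value is excluded as well; see cites).
def Pre_check_multisquare_free (adj : List (List Int)) : Prop :=
  adj = [] ∨ ∀ row ∈ adj, adj.length ≤ row.length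
instance (adj : List (List Int)) : Decidable (Pre_check_multisquare_free adj) := by
  unfold Pre_check_multisquare_free; infer_instance

def pvWitness_check_multisquare_free : List (List Int) := [[0, 1], [1, 0]]

def Spec_check_multisquare_free (adj : List (List Int)) (out : Bool × (Option (Int × Int × Int))) : Prop := out = check_multisquare_free_alt adj
instance (adj : List (List Int)) (out : Bool × (Option (Int × Int × Int))) : Decidable (Spec_check_multisquare_free adj out) := by unfold Spec_check_multisquare_free; infer_instance

-- ===== CLAIM (what is proved, stated in full; the proofs are below) =====
def Claim_equal_check_multisquare_free : Prop := ∀ (adj : List (List Int)), Dom_check_multisquare_free adj → Pre_check_multisquare_free adj → Spec_check_multisquare_free adj (check_multisquare_free adj)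

-- ===== LEMMAS AND PROOFS =====

-- pick the unique hit of an "if k = a" sum over a nodup list
theorem pvSum_pick (xs : List Int) (hn : xs.Nodup) (a : Int) (ha : a ∈ xs) (g : Int → Int) :
    (xs.map (fun k => if k = a then g k else 0)).sum = g a := by
  induction xs with
  | nil => cases ha
  | cons x xs ih =>
    simp only [List.map_cons, List.sum_cons]
    by_cases hax : x = a
    · subst hax
      have hnot : x ∉ xs := (List.nodup_cons.1 hn).1
      have h0 : (xs.map (fun k => if k = x then g k else 0)).sum = 0 := by
        apply List.sum_eq_zero
        intro v hv
        rcases List.mem_map.1 hv with ⟨k, hk, rfl⟩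
        have : k ≠ x := fun e => hnot (e ▸ hk)
        simp [this]
      simp [h0]
    · have hmem : a ∈ xs := by
        rcases List.mem_cons.1 ha with h | h
        · exact absurd h.symm hax
        · exact h
      rw [if_neg hax, ih (List.nodup_cons.1 hn).2 hmem]
      ring

theorem pvHead?_filterMap {α β : Type} (l : List α) (f : α → Option β) :
    (l.filterMap f).head? = l.findSome? f := by
  induction l with
  | nil => rfl
  | cons x l ih =>
    rw [List.filterMap_cons, List.findSome?_cons]
    cases f x <;> simp [ih]

theorem pvHead?_flatMap {α β : Type} (l : List α) (g : α → List β) :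
    (l.flatMap g).head? = l.findSome? (fun x => (g x).head?) := by
  induction l with
  | nil => rfl
  | cons x l ih =>
    rw [List.flatMap_cons, List.findSome?_cons, List.head?_append]
    cases h : (g x).head? <;> simp [ih, Option.or]

theorem pvFindSome?_congr {α β : Type} (l : List α) (f g : α → Option β)
    (h : ∀ x ∈ l, f x = g x) : l.findSome? f = l.findSome? g := by
  induction l with
  | nil => rfl
  | cons x l ih =>
    rw [List.findSome?_cons, List.findSome?_cons, h x (List.mem_cons_self ..)]
    cases g x with
    | some v => rfl
    | none => exact ih (fun y hy => h y (List.mem_cons_of_mem _ hy))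

-- abbreviation for the raw adjacency read both ports perform
def pvAGet (adj : List (List Int)) (i j : Int) : Int :=
  PySem.List.pyGetD (PySem.List.pyGetD adj i []) j 0

-- the 0/1 indicator entry of pvMatB
def pvInd (adj : List (List Int)) (i j : Int) : Int :=
  if pvAGet adj i j ≠ 0 then 1 else 0

theorem pvMatB_row (adj : List (List Int)) (n x : Int) (hx : x ∈ PySem.List.pyRange 0 n 1) :
    PySem.List.pyGetD (pvMatB adj n) x [] =
      (PySem.List.pyRange 0 n 1).map (fun j => pvInd adj x j) := by
  obtain ⟨h0, h1⟩ := (PySem.List.mem_pyRange_one).1 hx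
  unfold pvMatB
  rw [PySem.List.pyGetD_map_pyRange_of_nonneg _ _ _ _ h0 h1]
  rfl

theorem pvMatB_entry (adj : List (List Int)) (n x y : Int)
    (hx : x ∈ PySem.List.pyRange 0 n 1) (hy : y ∈ PySem.List.pyRange 0 n 1) :
    PySem.List.pyGetD (PySem.List.pyGetD (pvMatB adj n) x []) y 0 = pvInd adj x y := by
  obtain ⟨h0, h1⟩ := (PySem.List.mem_pyRange_one).1 hy
  rw [pvMatB_row adj n x hx, PySem.List.pyGetD_map_pyRange_of_nonneg _ _ _ _ h0 h1]

theorem pvMatC_entry (adj : List (List Int)) (n x y : Int)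
    (hx : x ∈ PySem.List.pyRange 0 n 1) (hy : y ∈ PySem.List.pyRange 0 n 1) :
    PySem.List.pyGetD (PySem.List.pyGetD (pvMatC (pvMatB adj n) n) x []) y 0 =
      ((PySem.List.pyRange 0 n 1).map (fun k => pvInd adj x k * pvInd adj k y)).sum := by
  obtain ⟨hx0, hx1⟩ := (PySem.List.mem_pyRange_one).1 hx
  obtain ⟨hy0, hy1⟩ := (PySem.List.mem_pyRange_one).1 hy
  unfold pvMatC pvMatB
  rw [List.map_map]
  rw [PySem.List.pyGetD_map_pyRange_of_nonneg _ _ _ _ hx0 hx1]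
  simp only [Function.comp]
  rw [PySem.List.pyGetD_map_pyRange_of_nonneg _ _ _ _ hy0 hy1]
  congr 1
  apply List.map_congr_left
  intro k hk
  obtain ⟨hk0, hk1⟩ := (PySem.List.mem_pyRange_one).1 hk
  rw [PySem.List.pyGetD_map_pyRange_of_nonneg _ _ _ _ hk0 hk1]
  have : PySem.List.pyGetD
      ((PySem.List.pyRange 0 n 1).map (fun i => (PySem.List.pyRange 0 n 1).map
        (fun j => if PySem.List.pyGetD (PySem.List.pyGetD adj i []) j 0 ≠ 0 then 1 else 0))) k [] =
      (PySem.List.pyRange 0 n 1).map (fun j => pvInd adj k j) := pvMatB_row adj n k hk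
  rw [this, PySem.List.pyGetD_map_pyRange_of_nonneg _ _ _ _ hy0 hy1]
  rfl

-- the corrected matrix entry equals A's per-pair count
theorem pvCnt_eq (adj : List (List Int)) (n x y : Int)
    (hx : x ∈ PySem.List.pyRange 0 n 1) (hy : y ∈ PySem.List.pyRange 0 n 1) (hxy : x ≠ y) :
    pvCnt (pvMatB adj n) (pvMatC (pvMatB adj n) n) x y =
      (((PySem.List.pyRange 0 n 1).countP (fun z =>
        decide (z ≠ x ∧ z ≠ y ∧ pvAGet adj x z ≠ 0 ∧ pvAGet adj z y ≠ 0))) : Int) := by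
  unfold pvCnt
  rw [pvMatC_entry adj n x y hx hy, pvMatB_entry adj n x x hx hx,
      pvMatB_entry adj n x y hx hy, pvMatB_entry adj n y y hy hy]
  have hterm : ∀ k ∈ PySem.List.pyRange 0 n 1,
      pvInd adj x k * pvInd adj k y =
        (if k ≠ x ∧ k ≠ y ∧ pvAGet adj x k ≠ 0 ∧ pvAGet adj k y ≠ 0 then (1:Int) else 0)
        + (if k = x then pvInd adj x x * pvInd adj x y else 0)
        + (if k = y then pvInd adj x y * pvInd adj y y else 0) := by
    intro k _
    by_cases h1 : k = x
    · subst h1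
      have h2 : k ≠ y := hxy
      simp [pvInd, h2]
    · by_cases h2 : k = y
      · subst h2
        simp [pvInd, h1]
      · simp only [pvInd, if_neg h1, if_neg h2]
        by_cases ha : pvAGet adj x k ≠ 0 <;> by_cases hb : pvAGet adj k y ≠ 0 <;>
          simp [ha, hb, h1, h2]
  rw [List.map_congr_left hterm]
  have hsplit : ∀ (f g h : Int → Int) (l : List Int),
      (l.map (fun k => f k + g k + h k)).sum = (l.map f).sum + (l.map g).sum + (l.map h).sum := by
    intro f g h l
    induction l with
    | nil => simp
    | cons a l ih => simp [ih]; ring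
  rw [hsplit]
  have hnd := PySem.List.nodup_pyRange_one (a := (0:Int)) (b := n)
  rw [pvSum_pick _ hnd x hx, pvSum_pick _ hnd y hy]
  have hdec : (((PySem.List.pyRange 0 n 1).countP (fun z =>
      decide (z ≠ x ∧ z ≠ y ∧ pvAGet adj x z ≠ 0 ∧ pvAGet adj z y ≠ 0))) : Int)
      = ((PySem.List.pyRange 0 n 1).map (fun k =>
          if k ≠ x ∧ k ≠ y ∧ pvAGet adj x k ≠ 0 ∧ pvAGet adj k y ≠ 0 then (1:Int) else 0)).sum := by
    rw [← PySem.List.sum_map_ite_one_zero]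
    congr 1
    apply List.map_congr_left
    intro z _
    simp
  rw [hdec]
  ring

-- A's inner loop is that countP
theorem pvCountA_eq (adj : List (List Int)) (n x y : Int) :
    (PySem.List.pyRange 0 n 1).foldl (fun count z =>
      if z ≠ x ∧ z ≠ y ∧ PySem.List.pyGetD (PySem.List.pyGetD adj x []) z 0 ≠ 0
          ∧ PySem.List.pyGetD (PySem.List.pyGetD adj z []) y 0 ≠ 0
      then count + 1 else count) 0 =
    (((PySem.List.pyRange 0 n 1).countP (fun z =>
      decide (z ≠ x ∧ z ≠ y ∧ pvAGet adj x z ≠ 0 ∧ pvAGet adj z y ≠ 0))) : Int) := by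
  rw [PySem.List.foldl_ite_add_one]
  simp [pvAGet]

-- ===== VERDICT (by name: the statement is the Claim_ definition above) =====
theorem check_multisquare_free_spec : Claim_equal_check_multisquare_free := by
  intro adj _ _
  unfold Spec_check_multisquare_free check_multisquare_free check_multisquare_free_alt
  dsimp only []
  rw [pvHead?_flatMap]
  have h : (PySem.List.pyRange 0 (adj.length : Int) 1).findSome? (fun x =>
      ((PySem.List.pyRange 0 (adj.length : Int) 1).filterMap (fun y =>
        if x ≠ y ∧ pvCnt (pvMatB adj (adj.length : Int)) (pvMatC (pvMatB adj (adj.length : Int)) (adj.length : Int)) x y ≥ 3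
        then some (x, y, pvCnt (pvMatB adj (adj.length : Int)) (pvMatC (pvMatB adj (adj.length : Int)) (adj.length : Int)) x y)
        else none)).head?) =
    (PySem.List.pyRange 0 (adj.length : Int) 1).findSome? (fun x =>
      (PySem.List.pyRange 0 (adj.length : Int) 1).findSome? (fun y =>
        if x = y then none
        else
          let count := (PySem.List.pyRange 0 (adj.length : Int) 1).foldl (fun count z =>
            if z ≠ x ∧ z ≠ y ∧ PySem.List.pyGetD (PySem.List.pyGetD adj x []) z 0 ≠ 0
                ∧ PySem.List.pyGetD (PySem.List.pyGetD adj z []) y 0 ≠ 0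
            then count + 1 else count) 0
          if count ≥ 3 then some (x, y, count) else none)) := by
    apply pvFindSome?_congr
    intro x hx
    rw [pvHead?_filterMap]
    apply pvFindSome?_congr
    intro y hy
    by_cases hxy : x = y
    · subst hxy
      simp
    · have hcnt := pvCnt_eq adj (adj.length : Int) x y hx hy hxy
      have hca := pvCountA_eq adj (adj.length : Int) x y
      simp only [if_neg hxy, hcnt, hca]
      by_cases hc : (((PySem.List.pyRange 0 (adj.length : Int) 1).countP (fun z =>
          decide (z ≠ x ∧ z ≠ y ∧ pvAGet adj x z ≠ 0 ∧ pvAGet adj z y ≠ 0))) : Int) ≥ 3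
      · rw [if_pos ⟨hxy, hc⟩, if_pos hc]
      · rw [if_neg (fun h => hc h.2), if_neg hc]
  rw [h]
  split <;> rename_i heq <;> rw [heq] <;> rfl
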